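-- pv_equiv track=rewrite | github.com/ElchaabiMohamed/InferCode_SVM | NC-5690-python-files/program_3547.py | jourNuit
-- ===== SOURCE A (Python) =====
-- def jourNuit(heure):
--   """
--   cette fonction a pour objectif d'indiquer dans quelle partie de la journée on est et s'il fait jour ou nuit
--   paramètre:
--     heure : de type int représente l'heure
--   résultat:un str qui indique dans quelle partie de la journée on est et s'il fait jour ou nuit
--   """
--   if heure>24 or heure<0:
--     res="l'heure saisie est invalide"
--   #on gère le moment de la journée
--   else:
--     if heure<5 or heure>=21:
--       res="on est la nuit"
--     elif heure<12:
--       res="on est le matin"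
--     elif heure<17:
--       res="on est l'après-midi"
--     else:
--       res="on est le soir"
--     #on gère s'il fait jour ou nuit
--     if heure<6 or heure>=18:
--       res=res+" et il fait nuit"
--     else:
--       res=res+" et il fait jour"
--   return res
--
--   #test de la fonction jourNuit
--   assert jourNuit(9)=="on est le matin et il fait jour","Problème avec jourNuit(9)"
--   assert jourNuit(15)=="on est l'après-midi et il fait jour","Problème avec jourNuit(9)"
--   assert jourNuit(29)=="l'heure saisie est invalide","Problème avec jourNuit(9)"
-- ===== SOURCE B (Python) =====
-- def jourNuit(heure):
--     if heure > 24 or heure < 0: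
--         return "l'heure saisie est invalide"
--     moments = ["on est la nuit", "on est le matin", "on est l'après-midi",
--                "on est le soir", "on est la nuit"]
--     jours = [" et il fait nuit", " et il fait jour", " et il fait nuit"]
--     i = sum(1 for t in (5, 12, 17, 21) if t <= heure)
--     j = sum(1 for t in (6, 18) if t <= heure)
--     return moments[i] + jours[j]
-- ===== Notes on version B (the rewrite author's own statement) =====
-- stated objective: idiomatic
-- what changed: Replaced the if/elif branch cascade by two threshold/label tables indexed by a count of thresholds not exceeding the hour, concatenating the two lookups.
import Mathlib
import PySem

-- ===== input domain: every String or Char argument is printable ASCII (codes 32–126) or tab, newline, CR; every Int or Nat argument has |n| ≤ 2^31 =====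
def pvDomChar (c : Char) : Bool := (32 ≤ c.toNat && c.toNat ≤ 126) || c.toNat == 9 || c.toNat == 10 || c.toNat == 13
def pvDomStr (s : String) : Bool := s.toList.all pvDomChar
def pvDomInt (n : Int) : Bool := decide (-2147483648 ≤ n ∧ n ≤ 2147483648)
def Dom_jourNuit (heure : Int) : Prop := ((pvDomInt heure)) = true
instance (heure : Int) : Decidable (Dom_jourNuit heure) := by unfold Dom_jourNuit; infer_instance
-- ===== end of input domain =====

-- B replaces A's if/elif cascade by two threshold/label tables indexed by a count of
-- thresholds ≤ heure (idiomatic table lookup); same values everywhere.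

-- ===== PORT A =====
def jourNuit (heure : Int) : String :=
  if heure > 24 || heure < 0 then
    "l'heure saisie est invalide"
  else
    let res :=
      if heure < 5 || heure ≥ 21 then "on est la nuit"
      else if heure < 12 then "on est le matin"
      else if heure < 17 then "on est l'après-midi"
      else "on est le soir"
    if heure < 6 || heure ≥ 18 then res ++ " et il fait nuit"
    else res ++ " et il fait jour"

-- ===== PORT B =====
def jourNuit_alt (heure : Int) : String :=
  if heure > 24 || heure < 0 then
    "l'heure saisie est invalide"
  else
    let moments := ["on est la nuit", "on est le matin", "on est l'après-midi",
                    "on est le soir", "on est la nuit"]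
    let jours := [" et il fait nuit", " et il fait jour", " et il fait nuit"]
    let i := ([5, 12, 17, 21] : List Int).foldl (fun acc t => if t ≤ heure then acc + 1 else acc) 0
    let j := ([6, 18] : List Int).foldl (fun acc t => if t ≤ heure then acc + 1 else acc) 0
    moments.getD i "" ++ jours.getD j ""

-- ===== PRECONDITION & SPEC =====
def Spec_jourNuit (heure : Int) (out : String) : Prop := out = jourNuit_alt heure
instance (heure : Int) (out : String) : Decidable (Spec_jourNuit heure out) := by unfold Spec_jourNuit; infer_instance

-- ===== CLAIM (what is proved, stated in full; the proofs are below) =====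
def Claim_equal_jourNuit : Prop := ∀ (heure : Int), Dom_jourNuit heure → Spec_jourNuit heure (jourNuit heure)

-- ===== LEMMAS AND PROOFS =====

-- ===== VERDICT (by name: the statement is the Claim_ definition above) =====
theorem jourNuit_spec : Claim_equal_jourNuit := by
  intro heure _
  unfold Spec_jourNuit
  by_cases h : 0 ≤ heure ∧ heure ≤ 24
  · obtain ⟨h1, h2⟩ := h
    interval_cases heure <;> rfl
  · have hc : (heure > 24 || heure < 0) = true := by
      simp only [Bool.or_eq_true, decide_eq_true_eq]; omega
    unfold jourNuit jourNuit_alt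
    rw [if_pos hc, if_pos hc]
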